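-- pv_equiv track=rewrite | github.com/Riyachauhan11/Python-DSA-and-Basics | recursion/1st_index_of_no.py | firstIndex
-- ===== SOURCE A (Python) =====
-- def firstIndex(arr, x):
--     # Please add your code here
--     l=len(arr)
--     if l==0:
--         return -1
--     if arr[0]==x:
--         return 0
--     small_list=arr[1:]
--     SmallerListOutput=firstIndex(small_list,x)
--     if SmallerListOutput != -1:
--         return SmallerListOutput+1
--     else:
--         return -1
-- ===== SOURCE B (Python) =====
-- def firstIndex(arr, x):
--     # Iterative scan over indices instead of recursion on arr[1:].
--     for i, v in enumerate(arr):
--         if v == x: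
--             return i
--     return -1
-- ===== Notes on version B (the rewrite author's own statement) =====
-- stated objective: faster
-- what changed: Replaced head-recursion that copies arr[1:] at every level and shifts the result by +1 with a single iterative enumerate loop returning the first matching index directly.
import Mathlib
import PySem

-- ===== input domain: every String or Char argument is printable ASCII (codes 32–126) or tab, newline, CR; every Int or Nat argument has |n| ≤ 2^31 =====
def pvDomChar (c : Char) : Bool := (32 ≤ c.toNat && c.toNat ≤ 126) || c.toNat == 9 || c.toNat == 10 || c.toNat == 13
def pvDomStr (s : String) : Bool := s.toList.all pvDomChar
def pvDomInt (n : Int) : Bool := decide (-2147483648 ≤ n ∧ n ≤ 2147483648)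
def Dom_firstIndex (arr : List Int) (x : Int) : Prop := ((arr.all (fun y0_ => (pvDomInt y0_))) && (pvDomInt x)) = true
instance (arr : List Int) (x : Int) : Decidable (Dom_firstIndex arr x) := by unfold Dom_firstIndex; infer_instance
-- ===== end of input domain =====

-- B replaces A's recursion (which copies arr[1:] and shifts the result) with one iterative enumerate scan.

-- ===== PORT A =====
-- literal port of A: recursion on the tail, result shifted by +1 unless -1
def firstIndex (arr : List Int) (x : Int) : Int :=
  match arr with
  | [] => -1
  | a :: rest =>
    if a = x then 0
    else
      let smallerListOutput := firstIndex rest x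
      if smallerListOutput ≠ -1 then smallerListOutput + 1 else -1

-- ===== PORT B =====
-- enum i arr = Python's enumerate(arr) starting at index i
def pvEnum (i : Int) : List Int → List (Int × Int)
  | [] => []
  | a :: t => (i, a) :: pvEnum (i + 1) t

-- the for-loop with early return over enumerate(arr)
def pvScan (x : Int) : List (Int × Int) → Int
  | [] => -1
  | (i, v) :: t => if v = x then i else pvScan x t

def firstIndex_alt (arr : List Int) (x : Int) : Int :=
  pvScan x (pvEnum 0 arr)

-- ===== PRECONDITION & SPEC =====
def Spec_firstIndex (arr : List Int) (x : Int) (out : Int) : Prop := out = firstIndex_alt arr x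
instance (arr : List Int) (x : Int) (out : Int) : Decidable (Spec_firstIndex arr x out) := by unfold Spec_firstIndex; infer_instance

-- ===== CLAIM (what is proved, stated in full; the proofs are below) =====
def Claim_equal_firstIndex : Prop := ∀ (arr : List Int) (x : Int), Dom_firstIndex arr x → Spec_firstIndex arr x (firstIndex arr x)

-- ===== LEMMAS AND PROOFS =====
theorem firstIndex_ge_neg_one (arr : List Int) (x : Int) : -1 ≤ firstIndex arr x := by
  induction arr with
  | nil => simp [firstIndex]
  | cons a t ih =>
    simp only [firstIndex]
    split_ifs <;> omega

theorem scan_enum_shift (arr : List Int) (x : Int) (k : Int) :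
    pvScan x (pvEnum k arr) =
      if firstIndex arr x = -1 then -1 else k + firstIndex arr x := by
  induction arr generalizing k with
  | nil => simp [pvEnum, pvScan, firstIndex]
  | cons a t ih =>
    simp only [pvEnum, pvScan, firstIndex]
    by_cases h : a = x
    · simp [h]
    · have hge := firstIndex_ge_neg_one t x
      simp only [h, if_false]
      rw [ih (k + 1)]
      split_ifs <;> omega

-- ===== VERDICT (by name: the statement is the Claim_ definition above) =====
theorem firstIndex_spec : Claim_equal_firstIndex := by
  intro arr x _
  unfold Spec_firstIndex firstIndex_alt
  rw [scan_enum_shift arr x 0]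
  have := firstIndex_ge_neg_one arr x
  split_ifs <;> omega
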